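-- pv_equiv track=rewrite | github.com/lucasfratus/python-uem | treino/Repetição_arranjos_conjuntos_pratica/valor_minimo.py | valor_minimo2
-- ===== SOURCE A (Python) =====
-- def valor_minimo(lst: list[int]) -> int:
--     '''
--     Conta quantas vezes o valor minimo de *lst* aparece na lista. *lst* nao pode ser vazia.
--     Exemplos
--     >>> valor_minimo([1,3,4,1])
--     2
--     >>> valor_minimo([2,3,4,3])
--     1
--     >>> valor_minimo([1])
--     1
--     '''
--     valor_minimo = lst[0]
--     contagem = 0
--
--
--     # Definindo valor_minimo
--     for n in lst:
--         if n < valor_minimo: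
--             valor_minimo = n
--     # Definindo contagem de minimos
--     for n in lst:
--         if n == valor_minimo:
--             contagem = contagem + 1
--     return contagem
--
-- def valor_minimo2(lst: list[int]) -> int:
--     '''
--     Conta quantas vezes o valor minimo de *lst* aparece na lista. *lst* nao pode ser vazia.
--     Exemplos
--     >>> valor_minimo2([1,3,4,1])
--     2
--     >>> valor_minimo2([2,3,4,3])
--     1
--     >>> valor_minimo2([1])
--     1
--     '''
--     valor_minimo = lst[0]
--     contagem = 0
--
--     for n in lst:
--         if n == valor_minimo:
--             contagem = contagem + 1
--         elif n < valor_minimo: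
--             contagem = 1
--             valor_minimo = n
--     return contagem
-- ===== SOURCE B (Python) =====
-- def valor_minimo2(lst: list[int]) -> int:
--     m = min(lst)
--     return lst.count(m)
-- ===== Notes on version B (the rewrite author's own statement) =====
-- stated objective: simpler
-- what changed: Replaces A's single fused pass with an incrementally reset counter by a two-pass find-then-count decomposition (min() then list.count()).
import Mathlib
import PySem

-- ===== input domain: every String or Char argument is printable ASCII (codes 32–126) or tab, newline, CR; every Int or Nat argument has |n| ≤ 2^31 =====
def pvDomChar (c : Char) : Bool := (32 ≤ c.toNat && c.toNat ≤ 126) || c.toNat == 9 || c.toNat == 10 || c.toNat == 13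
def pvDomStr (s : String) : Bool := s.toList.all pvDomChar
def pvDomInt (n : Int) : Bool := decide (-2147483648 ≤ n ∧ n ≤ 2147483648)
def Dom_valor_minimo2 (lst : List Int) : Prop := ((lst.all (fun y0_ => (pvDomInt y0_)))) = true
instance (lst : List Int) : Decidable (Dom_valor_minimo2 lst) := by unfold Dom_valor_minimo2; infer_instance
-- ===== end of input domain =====

-- B is a two-pass find-then-count decomposition (min then count), simpler than A's
-- fused single pass that resets the counter when a new minimum appears.

-- ===== PORT A =====
-- A: vm := lst[0]; single pass over lst updating (vm, contagem); returns contagem.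
def valor_minimo2 (lst : List Int) : Int :=
  let vm0 := (PySem.List.pyGet? lst 0).getD 0   -- lst[0]; Pre_ excludes the IndexError case []
  (lst.foldl
    (fun (s : Int × Int) n =>
      if n == s.1 then (s.1, s.2 + 1)
      else if n < s.1 then (n, 1)
      else s)
    (vm0, 0)).2

-- ===== PORT B =====
-- B: m = min(lst); return lst.count(m)
def valor_minimo2_alt (lst : List Int) : Int :=
  match PySem.List.min? lst (fun x => x) with
  | some m => (PySem.List.count lst m : Int)
  | none => 0   -- min([]) raises ValueError; excluded by Pre_

-- ===== PRECONDITION & SPEC =====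
-- A raises IndexError (and B's min raises ValueError) on the empty list.
def Pre_valor_minimo2 (lst : List Int) : Prop := lst ≠ []
instance (lst : List Int) : Decidable (Pre_valor_minimo2 lst) := by unfold Pre_valor_minimo2; infer_instance
def pvWitness_valor_minimo2 : List Int := ([1, 3, 4, 1])

def Spec_valor_minimo2 (lst : List Int) (out : Int) : Prop := out = valor_minimo2_alt lst
instance (lst : List Int) (out : Int) : Decidable (Spec_valor_minimo2 lst out) := by unfold Spec_valor_minimo2; infer_instance

-- ===== CLAIM (what is proved, stated in full; the proofs are below) =====
def Claim_equal_valor_minimo2 : Prop := ∀ (lst : List Int), Dom_valor_minimo2 lst → Pre_valor_minimo2 lst → Spec_valor_minimo2 lst (valor_minimo2 lst)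

-- ===== LEMMAS AND PROOFS =====

theorem foldl_min_le_self (t : List Int) (a : Int) : t.foldl min a ≤ a := by
  induction t generalizing a with
  | nil => simp
  | cons x xs ih => exact le_trans (ih (min a x)) (min_le_left a x)

-- Invariant of A's fused loop: the final counter equals the count of the overall
-- minimum, with the carried counter c only surviving when the minimum is still vm.
theorem valor_minimo2_foldl_inv (xs : List Int) (vm c : Int) :
    (xs.foldl
      (fun (s : Int × Int) n =>
        if n == s.1 then (s.1, s.2 + 1)
        else if n < s.1 then (n, 1)
        else s)
      (vm, c))
    = (xs.foldl min vm,
       (if xs.foldl min vm = vm then c else 0) + (xs.count (xs.foldl min vm) : Int)) := by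
  induction xs generalizing vm c with
  | nil => simp
  | cons n t ih =>
    simp only [List.foldl_cons]
    by_cases h1 : n = vm
    · subst h1
      simp only [beq_self_eq_true, if_true]
      rw [ih]
      simp only [min_self, List.count_cons, Prod.mk.injEq, beq_iff_eq, true_and]
      split_ifs <;> omega
    · have hne : (n == vm) = false := beq_eq_false_iff_ne.mpr h1
      rw [hne]
      simp only [Bool.false_eq_true, if_false]
      by_cases h2 : n < vm
      · simp only [h2, if_true]
        rw [ih]
        have hmin : min vm n = n := min_eq_right h2.le
        simp only [hmin]
        have hle : t.foldl min n ≤ n := foldl_min_le_self t n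
        have hnevm : t.foldl min n ≠ vm := fun h => absurd (h ▸ hle) (not_le.mpr h2)
        simp only [List.count_cons, Prod.mk.injEq, beq_iff_eq, true_and]
        split_ifs <;> omega
      · simp only [h2, if_false]
        rw [ih]
        have hmin : min vm n = vm := min_eq_left (not_lt.mp h2)
        simp only [hmin]
        have hle : t.foldl min vm ≤ vm := foldl_min_le_self t vm
        have hnen : n ≠ t.foldl min vm := by
          intro h
          exact absurd (h ▸ hle) (not_le.mpr (lt_of_le_of_ne (not_lt.mp h2) (Ne.symm h1)))
        simp only [List.count_cons, Prod.mk.injEq, beq_iff_eq, true_and]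
        split_ifs <;> omega

-- ===== VERDICT (by name: the statement is the Claim_ definition above) =====
theorem valor_minimo2_spec : Claim_equal_valor_minimo2 := by
  intro lst _ hpre
  unfold Spec_valor_minimo2 valor_minimo2 valor_minimo2_alt
  match lst with
  | [] => exact absurd rfl hpre
  | x :: t =>
    have h0 : (PySem.List.pyGet? (x :: t) 0).getD 0 = x := by
      simp [PySem.List.pyGet?, PySem.List.pyIdx?]
    rw [PySem.List.min?_id_cons]
    simp only [h0, List.foldl_cons, beq_self_eq_true, if_true]
    rw [valor_minimo2_foldl_inv]
    simp only [PySem.List.count, List.count_cons, beq_iff_eq]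
    split_ifs <;> omega
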